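-- pv_equiv track=rewrite | github.com/canferakbulut/TWITAUT | scraping/get_user_details_270622.py | create_queries
-- ===== SOURCE A (Python) =====
-- def chunker(seq, size):
--     return list(seq[pos:pos + size] for pos in range(0, len(seq), size))
--
-- def create_queries(users,
--                    user_fields = ["username", "name", "id", "created_at", "description", "verified"]):
--     user_slices = chunker(users, 100)
--     user_fields = ','.join(user_fields)
--     qs = []
--     for chunk in user_slices:
--         string_chunk = [str(x) for x in chunk]
--         query = ','.join(string_chunk)
--         q = {'ids': query, 'user.fields': user_fields}
--         qs.append(q)
--     return qs
-- ===== SOURCE B (Python) =====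
-- def create_queries(users,
--                    user_fields = ["username", "name", "id", "created_at", "description", "verified"]):
--     uf = ','.join(user_fields)
--     qs = []
--     buf = []
--     for x in users:
--         buf.append(str(x))
--         if len(buf) == 100:
--             qs.append({'ids': ','.join(buf), 'user.fields': uf})
--             buf = []
--     if buf:
--         qs.append({'ids': ','.join(buf), 'user.fields': uf})
--     return qs
-- ===== Notes on version B (the rewrite author's own statement) =====
-- stated objective: simpler
-- what changed: Replaced the index-arithmetic slice chunker (range/len slicing into sublists, then a second loop building dicts) by one flat pass over users that maintains a running string buffer, flushing a query dict every 100 elements and once more for the trailing partial chunk.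
import Mathlib
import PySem

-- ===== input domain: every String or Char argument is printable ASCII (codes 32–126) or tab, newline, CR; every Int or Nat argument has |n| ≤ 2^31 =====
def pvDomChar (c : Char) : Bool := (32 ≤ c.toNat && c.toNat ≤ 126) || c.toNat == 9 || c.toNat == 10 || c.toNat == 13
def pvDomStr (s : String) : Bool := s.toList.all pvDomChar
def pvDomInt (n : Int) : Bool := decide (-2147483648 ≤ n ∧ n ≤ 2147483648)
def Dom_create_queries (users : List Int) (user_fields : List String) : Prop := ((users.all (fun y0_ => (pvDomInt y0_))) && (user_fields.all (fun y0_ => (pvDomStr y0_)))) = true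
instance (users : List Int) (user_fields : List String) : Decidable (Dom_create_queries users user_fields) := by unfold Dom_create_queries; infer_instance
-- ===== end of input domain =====

-- B replaces the slice-based chunker with one flat pass keeping a running buffer, flushed every 100 elements; objective: simpler.

-- ===== PORT A =====
-- chunker(seq, size) = list(seq[pos:pos+size] for pos in range(0, len(seq), size))
def chunker (seq : List Int) (size : Int) : List (List Int) :=
  (PySem.List.pyRange 0 (seq.length : Int) size).map
    (fun pos => PySem.List.slice seq (some pos) (some (pos + size)))

def create_queries (users : List Int) (user_fields : List String) : List (List (String × String)) :=
  let user_slices := chunker users 100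
  let uf := PySem.Str.join "," user_fields
  user_slices.foldl
    (fun qs chunk =>
      let string_chunk := chunk.map PySem.Int.toStr
      let query := PySem.Str.join "," string_chunk
      qs ++ [[("ids", query), ("user.fields", uf)]])
    []

-- ===== PORT B =====
def create_queries_alt (users : List Int) (user_fields : List String) : List (List (String × String)) :=
  let uf := PySem.Str.join "," user_fields
  let st := users.foldl
    (fun (st : List (List (String × String)) × List String) x =>
      let buf := st.2 ++ [PySem.Int.toStr x]
      if buf.length = 100 then
        (st.1 ++ [[("ids", PySem.Str.join "," buf), ("user.fields", uf)]], ([] : List String))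
      else
        (st.1, buf))
    ([], [])
  if st.2.isEmpty then st.1
  else st.1 ++ [[("ids", PySem.Str.join "," st.2), ("user.fields", uf)]]

-- ===== PRECONDITION & SPEC =====
def Spec_create_queries (users : List Int) (user_fields : List String) (out : List (List (String × String))) : Prop := out = create_queries_alt users user_fields
instance (users : List Int) (user_fields : List String) (out : List (List (String × String))) : Decidable (Spec_create_queries users user_fields out) := by unfold Spec_create_queries; infer_instance

-- ===== CLAIM (what is proved, stated in full; the proofs are below) =====
def Claim_equal_create_queries : Prop := ∀ (users : List Int) (user_fields : List String), Dom_create_queries users user_fields → Spec_create_queries users user_fields (create_queries users user_fields)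

-- ===== LEMMAS AND PROOFS =====

/-- Reference chunking: successive blocks of 100. -/
def chunks100 {α : Type} (l : List α) : List (List α) :=
  if l.isEmpty then [] else l.take 100 :: chunks100 (l.drop 100)
termination_by l.length
decreasing_by simp_all [List.isEmpty_iff]; cases l <;> simp_all

def pvEntry (uf : String) (buf : List String) : List (String × String) :=
  [("ids", PySem.Str.join "," buf), ("user.fields", uf)]

/-- B's loop body, named for the proofs (definitionally the port's lambda). -/
def pvStep (uf : String) (st : List (List (String × String)) × List String) (x : Int) :
    List (List (String × String)) × List String :=
  let buf := st.2 ++ [PySem.Int.toStr x]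
  if buf.length = 100 then (st.1 ++ [pvEntry uf buf], ([] : List String))
  else (st.1, buf)

lemma chunks100_nil {α : Type} : chunks100 ([] : List α) = [] := by
  rw [chunks100]; simp

lemma chunks100_cons {α : Type} (l : List α) (h : l ≠ []) :
    chunks100 l = l.take 100 :: chunks100 (l.drop 100) := by
  rw [chunks100]; simp [List.isEmpty_iff, h]

lemma chunks100_map {α β : Type} (f : α → β) :
    ∀ (n : Nat) (l : List α), l.length ≤ n →
      chunks100 (l.map f) = (chunks100 l).map (List.map f) := by
  intro n
  induction n with
  | zero => intro l hl; have : l = [] := by cases l <;> simp_all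
            subst this; simp [chunks100_nil]
  | succ n ih =>
    intro l hl
    rcases eq_or_ne l [] with rfl | h
    · simp [chunks100_nil]
    · rw [chunks100_cons _ h, chunks100_cons (l.map f) (by simpa using h)]
      rw [← List.map_take, ← List.map_drop, ih (l.drop 100) (by simp; omega)]
      simp

lemma chunks100_eq_range : ∀ (n : Nat) (seq : List Int), seq.length ≤ n →
    (List.range ((seq.length + 99) / 100)).map
      (fun k => (seq.drop (100 * k)).take 100) = chunks100 seq := by
  intro n
  induction n with
  | zero => intro seq h; have : seq = [] := by cases seq <;> simp_all
            subst this; simp [chunks100_nil]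
  | succ n ih =>
    intro seq h
    rcases eq_or_ne seq [] with rfl | hne
    · simp [chunks100_nil]
    · have hlen : 1 ≤ seq.length := by cases seq <;> simp_all
      have hm : (seq.length + 99) / 100 = ((seq.drop 100).length + 99) / 100 + 1 := by
        simp only [List.length_drop]; omega
      have htail : (List.range (((seq.drop 100).length + 99) / 100)).map
          ((fun k => (seq.drop (100 * k)).take 100) ∘ Nat.succ) = chunks100 (seq.drop 100) := by
        rw [← ih (seq.drop 100) (by simp; omega)]
        apply List.map_congr_left
        intro k _
        simp only [Function.comp_apply, List.drop_drop]
        congr 2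
        omega
      rw [hm, List.range_succ_eq_map, List.map_cons, List.map_map, chunks100_cons _ hne, htail]
      simp

lemma chunker_eq_chunks100 (seq : List Int) : chunker seq 100 = chunks100 seq := by
  unfold chunker
  rw [PySem.List.pyRange_of_pos 0 (seq.length : Int) (by norm_num)]
  rw [List.map_map]
  rw [← chunks100_eq_range seq.length seq le_rfl]
  have hcnt : (if (0:Int) < (seq.length : Int) then (((seq.length : Int) - 0 + 100 - 1) / 100).toNat else 0)
      = (seq.length + 99) / 100 := by
    split_ifs with h <;> omega
  rw [hcnt]
  apply List.map_congr_left
  intro k _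
  simp only [Function.comp_apply]
  have h1 : (0 : Int) + 100 * (k : Int) = ((100 * k : Nat) : Int) := by push_cast; ring
  rw [h1]
  have h2 : ((100 * k : Nat) : Int) + 100 = ((100 * k : Nat) : Int) + ((100 : Nat) : Int) := by norm_num
  rw [h2, PySem.List.slice_natCast_add]

lemma foldl_append_map {α β : Type} (g : α → β) (cs : List α) (acc : List β) :
    cs.foldl (fun qs c => qs ++ [g c]) acc = acc ++ cs.map g := by
  induction cs generalizing acc <;> simp_all

/-- A computes the entries of the reference chunking. -/
lemma a_eq (users : List Int) (uf : String) :
    (chunks100 users).foldl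
      (fun qs chunk => qs ++ [pvEntry uf (chunk.map PySem.Int.toStr)]) []
    = (chunks100 (users.map PySem.Int.toStr)).map (pvEntry uf) := by
  have h := foldl_append_map (fun (chunk : List Int) => pvEntry uf (chunk.map PySem.Int.toStr)) (chunks100 users) []
  rw [chunks100_map PySem.Int.toStr users.length users le_rfl]
  refine h.trans ?_
  simp [List.map_map, Function.comp_def]

/-- B's buffer-loop invariant. -/
lemma b_eq (uf : String) : ∀ (seq : List Int) (qs : List (List (String × String))) (buf : List String),
    buf.length < 100 →
    (let st := seq.foldl (pvStep uf) (qs, buf)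
     if st.2.isEmpty then st.1 else st.1 ++ [pvEntry uf st.2])
    = qs ++ (chunks100 (buf ++ seq.map PySem.Int.toStr)).map (pvEntry uf) := by
  intro seq
  induction seq with
  | nil =>
    intro qs buf hb
    rcases eq_or_ne buf [] with rfl | h
    · simp [chunks100_nil]
    · rw [chunks100_cons _ (by simpa using h)]
      simp [List.take_of_length_le (le_of_lt hb), List.drop_of_length_le (le_of_lt hb),
            chunks100_nil, List.isEmpty_iff, h]
  | cons x seq ih =>
    intro qs buf hb
    simp only [List.foldl_cons, List.map_cons]
    by_cases h100 : (buf ++ [PySem.Int.toStr x]).length = 100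
    · have hstep : pvStep uf (qs, buf) x = (qs ++ [pvEntry uf (buf ++ [PySem.Int.toStr x])], ([] : List String)) := by
        unfold pvStep; rw [if_pos h100]
      have hih := ih (qs ++ [pvEntry uf (buf ++ [PySem.Int.toStr x])]) [] (by norm_num)
      simp only [List.nil_append] at hih
      have hsplit : buf ++ PySem.Int.toStr x :: seq.map PySem.Int.toStr
          = (buf ++ [PySem.Int.toStr x]) ++ seq.map PySem.Int.toStr := by simp
      rw [hstep, hih, hsplit,
          chunks100_cons ((buf ++ [PySem.Int.toStr x]) ++ seq.map PySem.Int.toStr) (by simp),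
          List.take_left' h100, List.drop_left' h100]
      simp
    · have hstep : pvStep uf (qs, buf) x = (qs, buf ++ [PySem.Int.toStr x]) := by
        unfold pvStep; rw [if_neg h100]
      rw [hstep, ih qs (buf ++ [PySem.Int.toStr x]) (by simp at h100 ⊢; omega)]
      simp

-- ===== VERDICT (by name: the statement is the Claim_ definition above) =====
theorem create_queries_spec : Claim_equal_create_queries := by
  intro users user_fields _
  unfold Spec_create_queries create_queries create_queries_alt
  rw [chunker_eq_chunks100]
  have hB := b_eq (PySem.Str.join "," user_fields) users [] [] (by norm_num)
  simp only [List.nil_append] at hB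
  exact (a_eq users (PySem.Str.join "," user_fields)).trans hB.symm
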